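-- pv_equiv track=rewrite | github.com/InnovativeInventor/groups | groups.py | _combine_like_terms
-- ===== SOURCE A (Python) =====
-- from typing import List, Tuple, Dict
--
-- def _combine_like_terms(term: List[Tuple[str, int]]) -> List[Tuple[str, int]]:
--     """
--     Iteratively combines like terms. Don't ask me why this is so stateful and poorly written.
--     """
--     new_term = []
--     count = 0
--
--     for generator, power in term:
--         if count > 0:
--             if generator == prev_generator: # like term discovered
--                 prev_power += power
--                 continue
--             else:
--                 new_term.append((prev_generator, prev_power))
--
--         prev_index = count
--         prev_generator = generator
--         prev_power = power
--         count += 1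
--     else:
--         if count >= 1:
--             new_term.append((prev_generator, prev_power))
--
--     return new_term
-- ===== SOURCE B (Python) =====
-- from typing import List, Tuple
--
-- def _combine_like_terms(term: List[Tuple[str, int]]) -> List[Tuple[str, int]]:
--     """Traverse the list BACK-TO-FRONT, building the output by merging each term
--     into the head of the result (no prev_* state, no final flush)."""
--     new_term: List[Tuple[str, int]] = []
--     for generator, power in reversed(term):
--         if new_term and new_term[0][0] == generator:
--             new_term[0] = (generator, power + new_term[0][1])
--         else:
--             new_term.insert(0, (generator, power))
--     return new_term
-- ===== Notes on version B (the rewrite author's own statement) =====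
-- stated objective: alternative
-- what changed: A scans left-to-right carrying prev_generator/prev_power/count state and flushes the pending run at branch changes and at the end; B traverses the list in REVERSE and builds the output back-to-front, merging each term into the current head of the output (a right fold), so it needs no pending-run state and no final flush.
import Mathlib
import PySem

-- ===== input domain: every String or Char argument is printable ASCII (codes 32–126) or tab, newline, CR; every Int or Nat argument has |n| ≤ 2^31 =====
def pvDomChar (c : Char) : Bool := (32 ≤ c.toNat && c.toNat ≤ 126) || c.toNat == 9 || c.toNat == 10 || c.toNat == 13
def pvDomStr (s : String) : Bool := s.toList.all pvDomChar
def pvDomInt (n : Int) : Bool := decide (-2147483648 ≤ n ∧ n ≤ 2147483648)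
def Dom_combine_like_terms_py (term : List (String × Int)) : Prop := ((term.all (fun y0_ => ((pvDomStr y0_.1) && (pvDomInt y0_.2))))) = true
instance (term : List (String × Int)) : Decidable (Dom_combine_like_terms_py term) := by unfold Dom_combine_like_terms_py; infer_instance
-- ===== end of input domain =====

-- B replaces A's left-to-right stateful scan (prev_* variables + final flush) by a
-- reverse traversal that builds the output back-to-front, merging each term into the
-- head of the output: an alternative decomposition with no pending-run state.


-- ===== PORT A =====
-- state = (new_term, count, prev_generator, prev_power); prev_* are read only when
-- count > 0, so the initial dummies "" and 0 are never observed (as in the Python,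
-- where they are simply unbound before the first iteration).
def pvAStep (st : List (String × Int) × Int × String × Int) (gp : String × Int) :
    List (String × Int) × Int × String × Int :=
  let (new_term, count, prev_g, prev_p) := st
  if count > 0 then
    if gp.1 = prev_g then
      (new_term, count, prev_g, prev_p + gp.2)        -- like term discovered; continue
    else
      (new_term ++ [(prev_g, prev_p)], count + 1, gp.1, gp.2)
  else
    (new_term, count + 1, gp.1, gp.2)

def combine_like_terms_py (term : List (String × Int)) : List (String × Int) :=
  let st := term.foldl pvAStep ([], 0, "", 0)
  let (new_term, count, prev_g, prev_p) := st
  if count ≥ 1 then new_term ++ [(prev_g, prev_p)] else new_term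

-- ===== PORT B =====
-- one reversed-iteration step: merge (g, p) into the head of the output, or prepend
def pvBStep (gp : String × Int) (acc : List (String × Int)) : List (String × Int) :=
  match acc with
  | (g', q) :: t => if g' = gp.1 then (gp.1, gp.2 + q) :: t else gp :: (g', q) :: t
  | [] => [gp]

-- Python's `for … in reversed(term)` prepending/merging at the front is a right fold
def combine_like_terms_py_alt (term : List (String × Int)) : List (String × Int) :=
  term.foldr pvBStep []

-- ===== PRECONDITION & SPEC =====
def Spec_combine_like_terms_py (term : List (String × Int)) (out : List (String × Int)) : Prop := out = combine_like_terms_py_alt term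
instance (term : List (String × Int)) (out : List (String × Int)) : Decidable (Spec_combine_like_terms_py term out) := by unfold Spec_combine_like_terms_py; infer_instance

-- ===== CLAIM (what is proved, stated in full; the proofs are below) =====
def Claim_equal_combine_like_terms_py : Prop := ∀ (term : List (String × Int)), Dom_combine_like_terms_py term → Spec_combine_like_terms_py term (combine_like_terms_py term)

-- ===== LEMMAS AND PROOFS =====

def pvFinish (st : List (String × Int) × Int × String × Int) : List (String × Int) :=
  if st.2.1 ≥ 1 then st.1 ++ [(st.2.2.1, st.2.2.2)] else st.1

theorem pvAlt_cons (g : String) (p : Int) (rest : List (String × Int)) :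
    combine_like_terms_py_alt ((g, p) :: rest) = pvBStep (g, p) (combine_like_terms_py_alt rest) := by
  simp [combine_like_terms_py_alt]

-- merging twice with the same generator = merging once with the summed power
theorem pvBStep_step (g : String) (p p' : Int) (L : List (String × Int)) :
    pvBStep (g, p) (pvBStep (g, p') L) = pvBStep (g, p + p') L := by
  cases L with
  | nil => simp [pvBStep]
  | cons hd t =>
    obtain ⟨g', q⟩ := hd
    by_cases h : g' = g
    · simp [pvBStep, h, add_assoc]
    · simp [pvBStep, h]

-- a step with a different generator just prepends
theorem pvBStep_ne (g g' : String) (p p' : Int) (L : List (String × Int)) (h : ¬ g' = g) :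
    pvBStep (g, p) (pvBStep (g', p') L) = (g, p) :: pvBStep (g', p') L := by
  cases L with
  | nil => simp [pvBStep, h]
  | cons hd t =>
    obtain ⟨g'', q⟩ := hd
    by_cases h2 : g'' = g'
    · simp [pvBStep, h2, h]
    · simp [pvBStep, h2, h]

-- once a group is open (count > 0), flushing A's fold equals acc ++ B on (g,p)::xs
theorem pvA_open (xs : List (String × Int)) : ∀ (acc : List (String × Int))
    (c : Int) (g : String) (p : Int), 0 < c →
    pvFinish (xs.foldl pvAStep (acc, c, g, p)) = acc ++ combine_like_terms_py_alt ((g, p) :: xs) := by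
  induction xs with
  | nil =>
    intro acc c g p hc
    simp only [List.foldl_nil, pvFinish]
    rw [if_pos (by omega), pvAlt_cons]
    simp [combine_like_terms_py_alt, pvBStep]
  | cons hd tl ih =>
    intro acc c g p hc
    obtain ⟨g', p'⟩ := hd
    by_cases h : g' = g
    · subst h
      have := ih acc c g' (p + p') hc
      simp only [List.foldl_cons, pvAStep, if_pos hc, if_true] at this ⊢
      rw [this, pvAlt_cons, pvAlt_cons, pvAlt_cons, pvBStep_step]
    · have := ih (acc ++ [(g, p)]) (c + 1) g' p' (by omega)
      simp only [List.foldl_cons, pvAStep, if_pos hc] at this ⊢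
      rw [if_neg h, this, pvAlt_cons g p, pvAlt_cons g' p' tl,
          pvBStep_ne g g' p p' _ h]
      simp

-- ===== VERDICT (by name: the statement is the Claim_ definition above) =====
theorem combine_like_terms_py_spec : Claim_equal_combine_like_terms_py := by
  intro term _
  unfold Spec_combine_like_terms_py combine_like_terms_py
  cases term with
  | nil => simp [combine_like_terms_py_alt]
  | cons hd tl =>
    obtain ⟨g, p⟩ := hd
    have := pvA_open tl [] 1 g p (by norm_num)
    simp only [pvFinish] at this
    have h0 : pvAStep ([], 0, "", 0) (g, p) = ([], 1, g, p) := by simp [pvAStep]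
    simp only [List.foldl_cons, h0]
    simpa using this
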